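-- pv_equiv track=rewrite | github.com/Darshan-D/DSA_IB | Arrays/make_equal_elements_array.py | solve
-- ===== SOURCE A (Python) =====
-- def solve(A, B):
--     n = len(A)
--     for target in A:
--         count = 0
--         for num in A:
--             if num==target:
--                 count += 1
--             elif num > target:
--                 if (num-B)^target != 0:
--                     break
--                 else:
--                     count += 1
--
--             elif num < target:
--                 if (num+B)^target != 0:
--                     break
--                 else:
--                     count += 1
--
--         if count == n:
--             return 1
--
--     return 0
-- ===== SOURCE B (Python) =====
-- def solve(A, B):
--     s = []
--     for v in A:
--         if v not in s:
--             s.append(v)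
--             if len(s) > 3:
--                 return 0
--     for t in s:
--         if all(v == t or (B > 0 and abs(v - t) == B) for v in s):
--             return 1
--     return 0
-- ===== Notes on version B (the rewrite author's own statement) =====
-- stated objective: faster
-- what changed: B makes a single early-exit pass collecting distinct values (returning 0 the moment a 4th distinct value appears, since a target admits at most 3 values t-B,t,t+B) and then tests the at most 3 distinct targets against the distinct values with plain abs-difference comparisons, replacing A's quadratic scan of all (target, num) pairs with xor tricks.
import Mathlib
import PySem

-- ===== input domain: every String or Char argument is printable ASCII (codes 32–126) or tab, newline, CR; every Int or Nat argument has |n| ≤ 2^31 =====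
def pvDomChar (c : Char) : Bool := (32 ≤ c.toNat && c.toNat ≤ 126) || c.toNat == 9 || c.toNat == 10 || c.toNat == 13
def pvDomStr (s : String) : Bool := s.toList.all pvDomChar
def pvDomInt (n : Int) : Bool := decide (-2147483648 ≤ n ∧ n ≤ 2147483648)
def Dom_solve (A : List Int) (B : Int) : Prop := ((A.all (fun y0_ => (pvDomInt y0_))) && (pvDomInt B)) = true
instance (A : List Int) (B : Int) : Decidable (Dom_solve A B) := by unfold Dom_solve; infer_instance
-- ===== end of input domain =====

-- B collects distinct values in one early-exit pass (0 as soon as a 4th distinct value appears)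
-- and then tests the at most 3 distinct targets with abs-difference comparisons; measurably faster.

-- ===== PORT A =====
-- inner 'for num in A' loop with its break (returning the count reached so far)
def solveInnerA (target B : Int) : List Int → Int → Int
  | [], count => count
  | num :: rest, count =>
    if num = target then solveInnerA target B rest (count + 1)
    else if num > target then
      if PySem.Int.bxor (num - B) target ≠ 0 then count
      else solveInnerA target B rest (count + 1)
    else
      if PySem.Int.bxor (num + B) target ≠ 0 then count
      else solveInnerA target B rest (count + 1)

-- outer 'for target in A' loop
def solveOuterA (A : List Int) (B n : Int) : List Int → Int
  | [] => 0
  | target :: rest =>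
    if solveInnerA target B A 0 = n then 1 else solveOuterA A B n rest

def solve (A : List Int) (B : Int) : Int :=
  solveOuterA A B (A.length : Int) A

-- ===== PORT B =====
-- first loop of Source B: collect distinct values, early 'return 0' (= none) on a 4th distinct
-- (s.append(v) under the guard 'v not in s' is exactly PySem.Set.add)
def scanDistinct : List Int → PySem.Set Int → Option (PySem.Set Int)
  | [], s => some s
  | v :: rest, s =>
    if s.contains v then scanDistinct rest s
    else
      let s' := PySem.Set.add s v
      if s'.length > 3 then none else scanDistinct rest s'

def solve_alt (A : List Int) (B : Int) : Int :=
  match scanDistinct A PySem.Set.empty with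
  | none => 0
  | some s =>
    if s.any (fun t => s.all (fun v => v == t || (decide (B > 0) && (|v - t| == B)))) then 1
    else 0

-- ===== PRECONDITION & SPEC =====
def Spec_solve (A : List Int) (B : Int) (out : Int) : Prop := out = solve_alt A B
instance (A : List Int) (B : Int) (out : Int) : Decidable (Spec_solve A B out) := by unfold Spec_solve; infer_instance

-- ===== CLAIM (what is proved, stated in full; the proofs are below) =====
def Claim_equal_solve : Prop := ∀ (A : List Int) (B : Int), Dom_solve A B → Spec_solve A B (solve A B)

-- ===== LEMMAS AND PROOFS =====

theorem bxor_eq_zero_iff (a b : Int) : PySem.Int.bxor a b = 0 ↔ a = b := by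
  unfold PySem.Int.bxor
  split_ifs with h1 h2 h2
  · rw [Int.natCast_eq_zero, Nat.xor_eq_zero_iff]; omega
  · generalize (a.toNat ^^^ (-b - 1).toNat) = x; omega
  · generalize ((-a - 1).toNat ^^^ b.toNat) = x; omega
  · rw [Int.natCast_eq_zero, Nat.xor_eq_zero_iff]; omega

-- A's per-element acceptance condition (in A's raw xor form)
def condA (B target num : Int) : Prop :=
  num = target ∨ (num > target ∧ PySem.Int.bxor (num - B) target = 0)
    ∨ (num < target ∧ PySem.Int.bxor (num + B) target = 0)

-- B's per-element acceptance condition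
def condB (B t v : Int) : Prop := v = t ∨ (B > 0 ∧ |v - t| = B)

theorem condA_iff (B target num : Int) :
    condA B target num ↔ condB B target num := by
  unfold condA condB
  rw [bxor_eq_zero_iff, bxor_eq_zero_iff]
  rcases abs_cases (num - target) with ⟨h, _⟩ | ⟨h, _⟩ <;> rw [h] <;> omega

theorem solveInnerA_all (target B : Int) (lst : List Int) (count : Int)
    (h : ∀ v ∈ lst, condA B target v) :
    solveInnerA target B lst count = count + lst.length := by
  induction lst generalizing count with
  | nil => simp [solveInnerA]
  | cons num rest ih =>
    have hc := h num (by simp)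
    have hr : ∀ v ∈ rest, condA B target v := fun v hv => h v (by simp [hv])
    unfold condA at hc
    unfold solveInnerA
    rcases hc with hc | ⟨hgt, hx⟩ | ⟨hlt, hx⟩
    · rw [if_pos hc, ih _ hr]; simp only [List.length_cons]; push_cast; ring
    · rw [if_neg (by omega), if_pos hgt, if_neg (by simp [hx]), ih _ hr]
      simp only [List.length_cons]; push_cast; ring
    · rw [if_neg (by omega), if_neg (by omega), if_neg (by simp [hx]), ih _ hr]
      simp only [List.length_cons]; push_cast; ring

theorem solveInnerA_not_all (target B : Int) (lst : List Int) (count : Int)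
    (h : ¬ ∀ v ∈ lst, condA B target v) :
    solveInnerA target B lst count < count + lst.length := by
  induction lst generalizing count with
  | nil => simp at h
  | cons num rest ih =>
    by_cases hc : condA B target num
    · have hr : ¬ ∀ v ∈ rest, condA B target v := by
        intro hall
        apply h
        intro v hv
        rcases List.mem_cons.mp hv with rfl | hv'
        · exact hc
        · exact hall v hv'
      have hlt2 := ih (count + 1) hr
      unfold condA at hc
      unfold solveInnerA
      rcases hc with hc | ⟨hgt, hx⟩ | ⟨hlt, hx⟩
      · rw [if_pos hc]; simp only [List.length_cons]; push_cast; omega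
      · rw [if_neg (by omega), if_pos hgt, if_neg (by simp [hx])]
        simp only [List.length_cons]; push_cast; omega
      · rw [if_neg (by omega), if_neg (by omega), if_neg (by simp [hx])]
        simp only [List.length_cons]; push_cast; omega
    · unfold condA at hc
      push Not at hc
      obtain ⟨h1, h2, h3⟩ := hc
      unfold solveInnerA
      by_cases hgt : num > target
      · rw [if_neg h1, if_pos hgt, if_pos (h2 hgt)]
        simp only [List.length_cons]; push_cast; omega
      · have hlt : num < target := by omega
        rw [if_neg h1, if_neg hgt, if_pos (h3 hlt)]
        simp only [List.length_cons]; push_cast; omega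

theorem solveOuterA_one (A : List Int) (B : Int) (lst : List Int)
    (h : ∃ t ∈ lst, ∀ v ∈ A, condA B t v) :
    solveOuterA A B (A.length : Int) lst = 1 := by
  induction lst with
  | nil => simp at h
  | cons t rest ih =>
    unfold solveOuterA
    by_cases hall : ∀ v ∈ A, condA B t v
    · rw [if_pos (by rw [solveInnerA_all t B A 0 hall]; ring)]
    · have hlt := solveInnerA_not_all t B A 0 hall
      rw [if_neg (by omega)]
      apply ih
      obtain ⟨u, hu, h2⟩ := h
      rcases List.mem_cons.mp hu with rfl | hu'
      · exact absurd h2 hall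
      · exact ⟨u, hu', h2⟩

theorem solveOuterA_zero (A : List Int) (B : Int) (lst : List Int)
    (h : ¬ ∃ t ∈ lst, ∀ v ∈ A, condA B t v) :
    solveOuterA A B (A.length : Int) lst = 0 := by
  induction lst with
  | nil => rfl
  | cons t rest ih =>
    unfold solveOuterA
    have hall : ¬ ∀ v ∈ A, condA B t v := fun hall => h ⟨t, by simp, hall⟩
    have hlt := solveInnerA_not_all t B A 0 hall
    rw [if_neg (by omega)]
    exact ih (fun ⟨u, hu, h2⟩ => h ⟨u, by simp [hu], h2⟩)

theorem exists_iff_set (A : List Int) (B : Int) :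
    (∃ t ∈ A, ∀ v ∈ A, condA B t v)
      ↔ (∃ t ∈ PySem.Set.ofList A, ∀ v ∈ PySem.Set.ofList A, condB B t v) := by
  constructor
  · rintro ⟨t, ht, h⟩
    exact ⟨t, (PySem.Set.mem_ofList A t).mpr ht,
      fun v hv => (condA_iff B t v).mp (h v ((PySem.Set.mem_ofList A v).mp hv))⟩
  · rintro ⟨t, ht, h⟩
    exact ⟨t, (PySem.Set.mem_ofList A t).mp ht,
      fun v hv => (condA_iff B t v).mpr (h v ((PySem.Set.mem_ofList A v).mpr hv))⟩

-- the >3-distinct shortcut is sound: a working target bounds the distinct values by 3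
theorem length_le_three (A : List Int) (B : Int)
    (h : ∃ t ∈ PySem.Set.ofList A, ∀ v ∈ PySem.Set.ofList A, condB B t v) :
    (PySem.Set.ofList A).length ≤ 3 := by
  obtain ⟨t, _, h⟩ := h
  have hsub : PySem.Set.ofList A ⊆ [t - B, t, t + B] := by
    intro v hv
    rcases h v hv with rfl | ⟨_, habs⟩
    · simp
    · rcases abs_cases (v - t) with ⟨he, _⟩ | ⟨he, _⟩ <;> simp <;> omega
  calc (PySem.Set.ofList A).length
      ≤ ([t - B, t, t + B] : List Int).length :=
        ((PySem.Set.nodup_ofList A).subperm hsub).length_le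
    _ = 3 := rfl

theorem any_iff (A : List Int) (B : Int) :
    ((PySem.Set.ofList A).any
        (fun t => (PySem.Set.ofList A).all
          (fun v => v == t || (decide (B > 0) && (|v - t| == B)))) = true)
      ↔ (∃ t ∈ PySem.Set.ofList A, ∀ v ∈ PySem.Set.ofList A, condB B t v) := by
  simp only [List.any_eq_true, List.all_eq_true, Bool.or_eq_true, Bool.and_eq_true,
    beq_iff_eq, decide_eq_true_eq, condB]

-- ===== VERDICT (by name: the statement is the Claim_ definition above) =====
theorem length_le_update (lst : List Int) (s : PySem.Set Int) :
    s.length ≤ (PySem.Set.update s lst).length := by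
  induction lst generalizing s with
  | nil => exact le_refl _
  | cons v rest ih =>
    have h1 : PySem.Set.update s (v :: rest) = PySem.Set.update (s.add v) rest := rfl
    have h2 : s.length ≤ (s.add v).length := by
      by_cases hv : v ∈ s
      · rw [PySem.Set.add_of_mem hv]
      · rw [PySem.Set.add_of_not_mem hv]; simp
    rw [h1]
    exact h2.trans (ih (s.add v))

theorem scanDistinct_cons (v : Int) (rest : List Int) (s : PySem.Set Int) :
    scanDistinct (v :: rest) s
      = if s.contains v then scanDistinct rest s
        else if (s.add v).length > 3 then none else scanDistinct rest (s.add v) := rfl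

theorem scanDistinct_spec (lst : List Int) (s : PySem.Set Int) (hs : s.length ≤ 3) :
    (scanDistinct lst s = none ∧ 3 < (PySem.Set.update s lst).length)
      ∨ (scanDistinct lst s = some (PySem.Set.update s lst)
          ∧ (PySem.Set.update s lst).length ≤ 3) := by
  induction lst generalizing s with
  | nil => exact Or.inr ⟨rfl, hs⟩
  | cons v rest ih =>
    have hup : PySem.Set.update s (v :: rest) = PySem.Set.update (s.add v) rest := rfl
    rw [scanDistinct_cons, hup]
    by_cases hv : v ∈ s
    · rw [if_pos ((PySem.Set.contains_iff s v).mpr hv), PySem.Set.add_of_mem hv]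
      exact ih s hs
    · have hcon : ¬ s.contains v = true := fun h => hv ((PySem.Set.contains_iff s v).mp h)
      rw [if_neg hcon]
      by_cases hlen : (s.add v).length > 3
      · rw [if_pos hlen]
        exact Or.inl ⟨rfl, lt_of_lt_of_le hlen (length_le_update rest (s.add v))⟩
      · rw [if_neg hlen]
        exact ih (s.add v) (by omega)

theorem update_empty (lst : List Int) :
    PySem.Set.update PySem.Set.empty lst = PySem.Set.ofList lst := by
  rw [PySem.Set.ofList_eq_foldl]; rfl

-- ===== VERDICT (by name: the statement is the Claim_ definition above) =====
theorem solve_spec : Claim_equal_solve := by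
  intro A B _
  unfold Spec_solve solve solve_alt
  rcases scanDistinct_spec A PySem.Set.empty (by simp [PySem.Set.empty]) with ⟨hnone, hlen⟩ | ⟨hsome, hlen⟩
  · rw [hnone]
    rw [update_empty] at hlen
    have hex : ¬ ∃ t ∈ A, ∀ v ∈ A, condA B t v := fun h => by
      have := length_le_three A B ((exists_iff_set A B).mp h)
      omega
    exact solveOuterA_zero A B A hex
  · rw [hsome, update_empty] at *
    by_cases hex : ∃ t ∈ A, ∀ v ∈ A, condA B t v
    · rw [solveOuterA_one A B A hex]
      show (1 : Int) = if ((PySem.Set.ofList A).any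
          (fun t => (PySem.Set.ofList A).all
            (fun v => v == t || (decide (B > 0) && (|v - t| == B))))) then 1 else 0
      rw [if_pos ((any_iff A B).mpr ((exists_iff_set A B).mp hex))]
    · rw [solveOuterA_zero A B A hex]
      show (0 : Int) = if ((PySem.Set.ofList A).any
          (fun t => (PySem.Set.ofList A).all
            (fun v => v == t || (decide (B > 0) && (|v - t| == B))))) then 1 else 0
      rw [if_neg (fun h => hex ((exists_iff_set A B).mpr ((any_iff A B).mp h)))]
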